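-- pv_equiv track=rewrite | github.com/Shakileash5/leetCode | number-of-segments-in-a-string/number-of-segments-in-a-string.py | countSegments
-- ===== SOURCE A (Python) =====
-- def countSegments(s: str) -> int:
--     size = len(s)
--     splits = 0
--     flag = 0
--     for i in range(size):
--         if s[i] != ' ':
--             if flag == 0:
--                 flag = 1
--                 splits += 1
--         else:
--             flag = 0
--
--     return splits
-- ===== SOURCE B (Python) =====
-- def countSegments(s: str) -> int:
--     # Split on the literal space character (the only separator A recognises),
--     # then count the non-empty tokens.
--     return len([w for w in s.split(' ') if w])
-- ===== Notes on version B (the rewrite author's own statement) =====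
-- stated objective: faster
-- what changed: Replaces A's character-by-character flag state machine with a build-then-count decomposition: split the string on the space character into tokens and count the non-empty ones (str.split runs in C, removing the per-character Python loop).
import Mathlib
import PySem

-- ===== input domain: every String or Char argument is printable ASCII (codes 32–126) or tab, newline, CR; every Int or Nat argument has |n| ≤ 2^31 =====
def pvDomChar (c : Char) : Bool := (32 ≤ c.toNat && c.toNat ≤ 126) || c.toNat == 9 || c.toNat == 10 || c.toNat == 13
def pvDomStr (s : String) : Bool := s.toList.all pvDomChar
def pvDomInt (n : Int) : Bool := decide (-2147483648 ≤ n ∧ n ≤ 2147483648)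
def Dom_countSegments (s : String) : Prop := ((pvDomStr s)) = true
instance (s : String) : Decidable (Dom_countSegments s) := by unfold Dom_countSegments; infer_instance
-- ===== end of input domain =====

-- B replaces A's per-character flag state machine with a split-then-count
-- decomposition: split on ' ' into tokens and count the non-empty ones (same O(n) cost).

-- ===== PORT A =====
-- A: loop over the characters keeping (splits, flag); flag=1 inside a segment.
def countSegments (s : String) : Int :=
  (s.toList.foldl
    (fun (st : Int × Int) c =>
      if c ≠ ' ' then
        (if st.2 = 0 then (st.1 + 1, 1) else st)
      else
        (st.1, 0))
    (0, 0)).1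

-- ===== PORT B =====
-- B: s.split(' ') ported as List.splitOn ' ' (keeps empty tokens, like Python's
-- split with an explicit separator), then the length of the non-empty tokens.
def countSegments_alt (s : String) : Int :=
  (((s.toList.splitOn ' ').filter (fun w => w ≠ [])).length : Nat)

-- ===== PRECONDITION & SPEC =====
def Spec_countSegments (s : String) (out : Int) : Prop := out = countSegments_alt s
instance (s : String) (out : Int) : Decidable (Spec_countSegments s out) := by unfold Spec_countSegments; infer_instance

-- ===== CLAIM (what is proved, stated in full; the proofs are below) =====
def Claim_equal_countSegments : Prop := ∀ (s : String), Dom_countSegments s → Spec_countSegments s (countSegments s)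

-- ===== LEMMAS AND PROOFS =====

-- number of non-empty chunks, as an Int
def pvNE (L : List (List Char)) : Int := ((L.filter (fun w => w ≠ [])).length : Nat)

-- A's loop body, named for the proofs (definitionally equal to the lambda in the port)
def pvStep (st : Int × Int) (c : Char) : Int × Int :=
  if c ≠ ' ' then (if st.2 = 0 then (st.1 + 1, 1) else st) else (st.1, 0)

lemma pvStep_space (st : Int × Int) : pvStep st ' ' = (st.1, 0) := by simp [pvStep]

lemma pvStep_ns0 {c : Char} (hc : c ≠ ' ') (n : Int) : pvStep (n, 0) c = (n + 1, 1) := by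
  simp [pvStep, hc]

lemma pvStep_ns1 {c : Char} (hc : c ≠ ' ') {flag : Int} (hf : flag ≠ 0) (n : Int) :
    pvStep (n, flag) c = (n, flag) := by simp [pvStep, hc, hf]

-- A's fold from state (n, flag) counts: all non-empty chunks when flag = 0,
-- only the chunks after the first separator when flag ≠ 0 (the current
-- segment was already counted).
lemma countSegments_key (l : List Char) (n : Int) (flag : Int) :
    (l.foldl pvStep (n, flag)).1
    = n + (if flag = 0 then pvNE (l.splitOn ' ') else pvNE ((l.splitOn ' ').tail)) := by
  induction l generalizing n flag with
  | nil => simp [pvNE, List.splitOn]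
  | cons c rest ih =>
    by_cases hc : c = ' '
    · subst hc
      have hsp : ((' ' :: rest).splitOn ' ') = [] :: rest.splitOn ' ' := by
        simp [List.splitOn, List.splitOnP_cons]
      rw [List.foldl_cons, pvStep_space, ih n 0, if_pos rfl]
      split_ifs <;> simp [hsp, pvNE]
    · obtain ⟨h, t, hht⟩ := List.exists_cons_of_ne_nil (List.splitOnP_ne_nil (· == ' ') rest)
      have hsplit : (c :: rest).splitOn ' ' = (c :: h) :: t := by
        simp [List.splitOn, List.splitOnP_cons, hc, hht]
      have hrest : rest.splitOn ' ' = h :: t := hht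
      by_cases hf : flag = 0
      · subst hf
        rw [List.foldl_cons, pvStep_ns0 hc, ih (n + 1) 1, if_neg one_ne_zero,
          if_pos rfl, hsplit, hrest]
        simp [pvNE]
        ring
      · rw [List.foldl_cons, pvStep_ns1 hc hf, ih n flag, if_neg hf, if_neg hf,
          hsplit, hrest]
        rfl

-- ===== VERDICT (by name: the statement is the Claim_ definition above) =====
theorem countSegments_spec : Claim_equal_countSegments := by
  intro s _
  unfold Spec_countSegments countSegments countSegments_alt
  have h := countSegments_key s.toList 0 0
  rw [if_pos rfl, zero_add] at h
  exact h
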